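-- pv_equiv track=rewrite | github.com/laclustr/CSP | Lessons/8friNov15.py | rem_aeiou_rev
-- ===== SOURCE A (Python) =====
-- def rem_aeiou_rev(string):
-- 	res = ""
-- 	i = len(string) - 1
-- 	while i >= 0:
-- 		if not (string[i] == "a" or
-- 				string[i] == "o" or
-- 				string[i] == "u" or
-- 				string[i] == "e" or
-- 				string[i] == "i"):
-- 			res = res + string[i]
--
-- 		i -= 1
--
-- 	return res
-- ===== SOURCE B (Python) =====
-- def rem_aeiou_rev(string):
--     filtered = "".join(c for c in string if c not in "aeiou")
--     return filtered[::-1]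
-- ===== Notes on version B (the rewrite author's own statement) =====
-- stated objective: idiomatic
-- what changed: A's single fused backward index loop (building res by repeated concatenation) is replaced by a forward filter pass with join followed by a separate slice reversal.
import Mathlib
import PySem

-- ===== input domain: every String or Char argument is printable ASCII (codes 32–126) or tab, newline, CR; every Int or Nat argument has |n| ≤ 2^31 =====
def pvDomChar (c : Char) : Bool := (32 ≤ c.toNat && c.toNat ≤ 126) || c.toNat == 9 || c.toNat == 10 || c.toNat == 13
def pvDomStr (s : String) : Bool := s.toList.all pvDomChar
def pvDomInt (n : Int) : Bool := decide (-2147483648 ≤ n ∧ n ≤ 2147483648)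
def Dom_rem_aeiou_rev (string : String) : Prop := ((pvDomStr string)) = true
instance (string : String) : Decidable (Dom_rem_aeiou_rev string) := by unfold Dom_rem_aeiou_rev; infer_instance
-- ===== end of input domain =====

-- B replaces A's fused backward index loop by a forward filter pass plus a separate reversal (idiomatic decomposition).

-- ===== PORT A =====
-- A's while-loop: i runs from len(string)-1 down to 0; we recurse on k = i+1 (k = 0 ⟺ loop finished).
-- string[i] is always in range in A, so the indexing is total (getD never hits its default).
def remAeiouRevLoop (s : List Char) : Nat → String → String
  | 0, res => res
  | k + 1, res =>
    let c := s.getD k ' '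
    remAeiouRevLoop s k
      (if ¬ (c == 'a' || c == 'o' || c == 'u' || c == 'e' || c == 'i') then res ++ String.ofList [c] else res)

def rem_aeiou_rev (string : String) : String :=
  remAeiouRevLoop string.toList string.toList.length ""

-- ===== PORT B =====
-- forward filter pass ("".join of a comprehension with `c not in "aeiou"`), then slice reversal [::-1]
def rem_aeiou_rev_alt (string : String) : String :=
  let filtered := String.ofList (string.toList.filter (fun c => ¬ ("aeiou".toList.contains c)))
  match PySem.List.slice? filtered.toList none none (-1) with
  | some l => String.ofList l
  | none => filtered

-- ===== PRECONDITION & SPEC =====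
def Spec_rem_aeiou_rev (string : String) (out : String) : Prop := out = rem_aeiou_rev_alt string
instance (string : String) (out : String) : Decidable (Spec_rem_aeiou_rev string out) := by unfold Spec_rem_aeiou_rev; infer_instance

-- ===== CLAIM (what is proved, stated in full; the proofs are below) =====
def Claim_equal_rem_aeiou_rev : Prop := ∀ (string : String), Dom_rem_aeiou_rev string → Spec_rem_aeiou_rev string (rem_aeiou_rev string)

-- ===== LEMMAS AND PROOFS =====

theorem remAeiouRevLoop_toList (s : List Char) :
    ∀ (k : Nat) (res : String), k ≤ s.length →
      (remAeiouRevLoop s k res).toList =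
        res.toList ++ ((s.take k).filter (fun c => !(c == 'a' || c == 'o' || c == 'u' || c == 'e' || c == 'i'))).reverse := by
  intro k
  induction k with
  | zero => intro res _; simp [remAeiouRevLoop]
  | succ k ih =>
    intro res hk
    have hk' : k < s.length := Nat.lt_of_succ_le hk
    have htake : s.take (k + 1) = s.take k ++ [s[k]] := by
      rw [List.take_add_one, List.getElem?_eq_getElem hk']
      rfl
    have hgetD : s.getD k ' ' = s[k] := by
      simp [List.getD, List.getElem?_eq_getElem hk']
    rw [remAeiouRevLoop]
    simp only [hgetD, htake, List.filter_append, List.reverse_append]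
    by_cases h : (s[k] == 'a' || s[k] == 'o' || s[k] == 'u' || s[k] == 'e' || s[k] == 'i') = true
    · rw [if_neg (by simp [h]), ih res (Nat.le_of_lt hk')]
      have : List.filter (fun c => !(c == 'a' || c == 'o' || c == 'u' || c == 'e' || c == 'i')) [s[k]] = [] := by
        simp [List.filter, h]
      rw [this]
      simp
    · rw [if_pos (by simp [h]), ih _ (Nat.le_of_lt hk')]
      have : List.filter (fun c => !(c == 'a' || c == 'o' || c == 'u' || c == 'e' || c == 'i')) [s[k]] = [s[k]] := by
        simp [List.filter, h]
      rw [this]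
      simp

theorem remAeiou_filter_pred (c : Char) :
    (!(c == 'a' || c == 'o' || c == 'u' || c == 'e' || c == 'i')) =
      decide (¬ ("aeiou".toList.contains c) = true) := by
  have : "aeiou".toList = ['a', 'e', 'i', 'o', 'u'] := by decide
  rw [this]
  by_cases h1 : c = 'a' <;> by_cases h2 : c = 'e' <;> by_cases h3 : c = 'i' <;>
    by_cases h4 : c = 'o' <;> by_cases h5 : c = 'u' <;> simp_all

-- ===== VERDICT (by name: the statement is the Claim_ definition above) =====
theorem rem_aeiou_rev_spec : Claim_equal_rem_aeiou_rev := by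
  intro s _
  unfold Spec_rem_aeiou_rev rem_aeiou_rev rem_aeiou_rev_alt
  simp only [String.toList_ofList, PySem.List.slice?_none_none_neg_one]
  apply String.toList_inj.mp
  rw [remAeiouRevLoop_toList s.toList s.toList.length "" le_rfl]
  simp only [List.take_length, String.toList_ofList, String.toList_empty, List.nil_append]
  congr 1
  exact List.filter_congr (fun c _ => remAeiou_filter_pred c)
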